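-- pv_equiv track=rewrite | github.com/Likelion-HUFS-10th/Algorithm | 2팀/최유정/kakao/1116_불량사용자.py | solution
-- ===== SOURCE A (Python) =====
-- from itertools import product
-- from collections import deque
--
-- def star(b):
--     star = []
--     for i in range(len(b)):
--         if b[i] == '*':
--             star.append(i)
--     return star
--
-- def change(star, u):
--     new_u = list(u)
--     for s in star:
--         new_u[s] = '*'
--     new_u = ''.join(new_u)
--     return new_u
--
-- def solution(user_id, banned_id):
--     result = [[] for _ in range(len(banned_id))]
--     for b in range(len(banned_id)):
--         s = star(banned_id[b])
--         for u in range(len(user_id)):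
--             if len(banned_id[b]) == len(user_id[u]):
--                 new_u = change(s, user_id[u])
--                 if new_u == banned_id[b]:
--                     result[b].append(user_id[u])
--
--     answer = deque(product(*result))
--     an = []
--     while answer:
--         a = answer.pop()
--         if len(a) != len(set(a)):
--             continue
--         else:
--             a = list(a)
--             a.sort()
--             if a not in an:
--                 an.append(a)
--     return len(an)
-- ===== SOURCE B (Python) =====
-- def solution(user_id, banned_id):
--     def matches(b, u):
--         return len(b) == len(u) and all(bc == '*' or bc == uc for bc, uc in zip(b, u))
--
--     cand = [[u for u in user_id if matches(b, u)] for b in banned_id]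
--     seen = set()
--
--     def bt(i, chosen):
--         if i == len(cand):
--             seen.add(tuple(sorted(chosen)))
--         else:
--             for u in cand[i]:
--                 if u not in chosen:
--                     bt(i + 1, chosen + [u])
--
--     bt(0, [])
--     return len(seen)
-- ===== Notes on version B (the rewrite author's own statement) =====
-- stated objective: alternative
-- what changed: Replaces A's full itertools.product enumeration with deque scan and linear-list dedup ('a not in an') by a pruned backtracking search that skips already-used users and dedups via a set of sorted tuples; intended as faster (a timing run saw A time out at n=16 where B returned, but could not verify a ratio), so no unqualified speed claim is made.
import Mathlib
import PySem

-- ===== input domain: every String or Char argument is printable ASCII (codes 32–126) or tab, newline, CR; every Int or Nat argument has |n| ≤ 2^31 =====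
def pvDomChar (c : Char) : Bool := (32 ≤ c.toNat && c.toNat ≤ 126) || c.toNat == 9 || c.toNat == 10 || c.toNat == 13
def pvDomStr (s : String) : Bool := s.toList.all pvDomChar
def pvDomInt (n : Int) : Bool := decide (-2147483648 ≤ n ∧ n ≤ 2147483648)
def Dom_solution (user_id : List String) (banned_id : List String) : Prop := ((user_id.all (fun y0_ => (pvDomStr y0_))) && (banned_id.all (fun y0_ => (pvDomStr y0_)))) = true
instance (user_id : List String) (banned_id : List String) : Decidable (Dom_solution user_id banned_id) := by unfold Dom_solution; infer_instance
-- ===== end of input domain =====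

-- B replaces A's full-product enumeration + linear-list dedup by a pruned backtracking
-- search deduplicated through a set of sorted tuples (objective: alternative algorithm).

-- ===== PORT A =====
-- star(b): the indices i with b[i] == '*'
def starA (b : List Char) : List Nat :=
  (List.range b.length).filter (fun i => b.getD i ' ' == '*')

-- change(star, u): set u's characters at the star positions to '*'
def changeA (star : List Nat) (u : List Char) : List Char :=
  star.foldl (fun nu s => nu.set s '*') u

-- itertools.product(*result): first list varies slowest
def prodA : List (List String) → List (List String)
  | [] => [[]]
  | l :: ls => l.flatMap (fun x => (prodA ls).map (fun t => x :: t))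

-- the while-loop over the deque: pops from the right (handled by reversing before the call),
-- skips combos with repeated users (len(a) != len(set(a))), sorts, appends if unseen
def dedupLoopA : List (List String) → List (List String) → List (List String)
  | [], an => an
  | a :: rest, an =>
    if a.length ≠ (PySem.Set.ofList a).length then dedupLoopA rest an
    else
      let a' := PySem.List.sorted a (fun x => x) false
      if a' ∈ an then dedupLoopA rest an else dedupLoopA rest (an ++ [a'])

def solution (user_id : List String) (banned_id : List String) : Int :=
  let result := banned_id.map (fun b =>
    user_id.filter (fun u =>
      b.toList.length == u.toList.length &&
      changeA (starA b.toList) u.toList == b.toList))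
  let answer := prodA result
  Int.ofNat (dedupLoopA answer.reverse []).length

-- ===== PORT B =====
def matchesB (b u : String) : Bool :=
  b.toList.length == u.toList.length &&
  (b.toList.zip u.toList).all (fun p => p.1 == '*' || p.1 == p.2)

-- bt(i, chosen): backtracking over cand[i:], skipping users already chosen,
-- adding the sorted full choice to the seen-set at the leaves
def btB : List (List String) → List String → PySem.Set (List String) → PySem.Set (List String)
  | [], chosen, seen => PySem.Set.add seen (PySem.List.sorted chosen (fun x => x) false)
  | c :: rest, chosen, seen =>
    c.foldl (fun sn u => if u ∈ chosen then sn else btB rest (chosen ++ [u]) sn) seen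

def solution_alt (user_id : List String) (banned_id : List String) : Int :=
  let cand := banned_id.map (fun b => user_id.filter (fun u => matchesB b u))
  PySem.Set.len (btB cand [] PySem.Set.empty)

-- ===== PRECONDITION & SPEC =====
def Spec_solution (user_id : List String) (banned_id : List String) (out : Int) : Prop := out = solution_alt user_id banned_id
instance (user_id : List String) (banned_id : List String) (out : Int) : Decidable (Spec_solution user_id banned_id out) := by unfold Spec_solution; infer_instance

-- ===== CLAIM (what is proved, stated in full; the proofs are below) =====
def Claim_equal_solution : Prop := ∀ (user_id : List String) (banned_id : List String), Dom_solution user_id banned_id → Spec_solution user_id banned_id (solution user_id banned_id)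

-- ===== LEMMAS AND PROOFS =====

-- the common sort used by both programs
def sortf (l : List String) : List String := PySem.List.sorted l (fun x => x) false

lemma starA_cons (c : Char) (bs : List Char) :
    starA (c :: bs) = (if c == '*' then [0] else []) ++ (starA bs).map Nat.succ := by
  unfold starA
  rw [List.length_cons, List.range_succ_eq_map, List.filter_cons, List.filter_map]
  cases h : c == '*' <;> simp [h, Function.comp_def]

lemma changeA_append (s t : List Nat) (u : List Char) :
    changeA (s ++ t) u = changeA t (changeA s u) := by
  unfold changeA; exact List.foldl_append

lemma changeA_map_succ (s : List Nat) (x : Char) (xs : List Char) :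
    changeA (s.map Nat.succ) (x :: xs) = x :: changeA s xs := by
  induction s generalizing xs with
  | nil => rfl
  | cons a s ih =>
      unfold changeA at *
      simp only [List.map_cons, List.foldl_cons]
      rw [show (x :: xs).set (Nat.succ a) '*' = x :: xs.set a '*' from rfl]
      exact ih _

-- A's change-based match agrees with B's positionwise match
lemma change_star_eq (b u : List Char) (h : b.length = u.length) :
    (changeA (starA b) u = b) ↔ ((b.zip u).all (fun p => p.1 == '*' || p.1 == p.2) = true) := by
  induction b generalizing u with
  | nil =>
      cases u with
      | nil => simp [starA, changeA]
      | cons x xs => simp at h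
  | cons c bs ih =>
      cases u with
      | nil => simp at h
      | cons x xs =>
          have hlen : bs.length = xs.length := by simpa using h
          rw [starA_cons, changeA_append]
          by_cases hc : c = '*'
          · have hh : changeA (if c == '*' then [0] else []) (x :: xs) = '*' :: xs := by
              simp [hc, changeA]
            rw [hh, changeA_map_succ]
            simp [hc, ih xs hlen]
          · have hh : changeA (if c == '*' then [0] else []) (x :: xs) = x :: xs := by
              simp [hc, changeA]
            have hc' : (c == '*') = false := by simp [hc]
            rw [hh, changeA_map_succ]
            simp only [List.zip_cons_cons, List.all_cons, hc', Bool.false_or,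
              Bool.and_eq_true, beq_iff_eq, List.cons.injEq]
            constructor
            · rintro ⟨h1, h2⟩; exact ⟨h1.symm, (ih xs hlen).mp h2⟩
            · rintro ⟨h1, h2⟩; exact ⟨h1.symm, (ih xs hlen).mpr h2⟩

-- the two filters over user_id coincide
lemma filter_match_eq (user_id : List String) (b : String) :
    user_id.filter (fun u =>
      b.toList.length == u.toList.length &&
      changeA (starA b.toList) u.toList == b.toList)
    = user_id.filter (fun u => matchesB b u) := by
  apply List.filter_congr
  intro u _
  unfold matchesB
  by_cases h : b.toList.length = u.toList.length
  · have := change_star_eq b.toList u.toList h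
    cases hz : (b.toList.zip u.toList).all (fun p => p.1 == '*' || p.1 == p.2) <;>
      simp_all
  · have hf : (b.toList.length == u.toList.length) = false := by
      exact beq_eq_false_iff_ne.mpr h
    rw [hf]
    simp

-- building a Python set from a list appends a subsequence of the list
lemma foldl_add_eq_append (xs : List String) :
    ∀ s : PySem.Set String, ∃ t, xs.foldl PySem.Set.add s = s ++ t ∧ t.Sublist xs := by
  induction xs with
  | nil => intro s; exact ⟨[], by simp, List.Sublist.refl _⟩
  | cons x xs ih =>
      intro s
      simp only [List.foldl_cons]
      by_cases hx : x ∈ s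
      · rw [PySem.Set.add_of_mem hx]
        obtain ⟨t, ht, hs⟩ := ih s
        exact ⟨t, ht, hs.cons x⟩
      · rw [PySem.Set.add_of_not_mem hx]
        obtain ⟨t, ht, hs⟩ := ih (s ++ [x])
        exact ⟨x :: t, by rw [ht]; simp, hs.cons₂ x⟩

-- Python's len(a) == len(set(a)) is exactly Nodup
lemma lenOfList_iff_nodup (a : List String) :
    (a.length = (PySem.Set.ofList a).length) ↔ a.Nodup := by
  obtain ⟨t, ht, hs⟩ := foldl_add_eq_append a []
  have hofl : PySem.Set.ofList a = t := by rw [PySem.Set.ofList_eq_foldl, ht]; simp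
  have hndt : t.Nodup := hofl ▸ PySem.Set.nodup_ofList a
  constructor
  · intro hlen
    have hlt : t.length = a.length := hofl ▸ hlen.symm
    have hta : t = a := hs.eq_of_length hlt
    rw [← hta]; exact hndt
  · intro hnd
    have hperm : t.Perm a := List.perm_of_nodup_nodup_toFinset_eq hndt hnd (by
      ext x
      rw [List.mem_toFinset, List.mem_toFinset, ← hofl, PySem.Set.mem_ofList])
    rw [hofl, hperm.length_eq]

-- A's dedup loop: Nodup accumulator holding exactly the sorted valid combos
lemma dedupLoopA_spec (xs : List (List String)) :
    ∀ an : List (List String), an.Nodup →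
      (dedupLoopA xs an).Nodup ∧
      (dedupLoopA xs an).toFinset =
        an.toFinset ∪ ((xs.filter (fun a => a.Nodup)).map sortf).toFinset := by
  induction xs with
  | nil => intro an h; simp [dedupLoopA, h]
  | cons a rest ih =>
      intro an h
      by_cases hnd : a.Nodup
      · have hcond : ¬ (a.length ≠ (PySem.Set.ofList a).length) := by
          simp [lenOfList_iff_nodup a, hnd]
        rw [show dedupLoopA (a :: rest) an =
            (if sortf a ∈ an then dedupLoopA rest an
             else dedupLoopA rest (an ++ [sortf a])) from by
          simp [dedupLoopA, hcond, sortf]]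
        rw [List.filter_cons_of_pos (by simp [hnd]), List.map_cons, List.toFinset_cons]
        by_cases hmem : sortf a ∈ an
        · rw [if_pos hmem]
          obtain ⟨h1, h2⟩ := ih an h
          refine ⟨h1, ?_⟩
          rw [h2, Finset.union_insert,
            Finset.insert_eq_of_mem (Finset.mem_union_left _ (by simpa using hmem))]
        · rw [if_neg hmem]
          have h' : (an ++ [sortf a]).Nodup := by
            rw [List.nodup_append]
            refine ⟨h, List.nodup_singleton _, ?_⟩
            intro y hy b hb hyb
            rw [List.mem_singleton.mp hb] at hyb
            exact hmem (hyb ▸ hy)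
          obtain ⟨h1, h2⟩ := ih (an ++ [sortf a]) h'
          refine ⟨h1, ?_⟩
          rw [h2, List.toFinset_append, Finset.insert_eq, ← Finset.union_assoc]
          simp
      · have hcond : a.length ≠ (PySem.Set.ofList a).length := by
          simp [lenOfList_iff_nodup a, hnd]
        rw [show dedupLoopA (a :: rest) an = dedupLoopA rest an from by
          simp [dedupLoopA, hcond]]
        obtain ⟨h1, h2⟩ := ih an h
        refine ⟨h1, ?_⟩
        rw [h2, List.filter_cons_of_neg (by simp [hnd])]

lemma btB_cons (c : List String) (rest : List (List String)) (chosen : List String)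
    (seen : PySem.Set (List String)) :
    btB (c :: rest) chosen seen =
      c.foldl (fun sn u => if u ∈ chosen then sn else btB rest (chosen ++ [u]) sn) seen := by
  simp [btB]

-- B's backtracking: adds exactly the sorted (chosen ++ valid-extension) combos to seen
lemma btB_spec (cand : List (List String)) :
    ∀ (chosen : List String) (seen : PySem.Set (List String)),
      chosen.Nodup → List.Nodup seen →
      (btB cand chosen seen).Nodup ∧
      (btB cand chosen seen).toFinset =
        seen.toFinset ∪
          (((prodA cand).filter (fun t => (chosen ++ t).Nodup)).map
            (fun t => sortf (chosen ++ t))).toFinset := by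
  induction cand with
  | nil =>
      intro chosen seen hch hseen
      have hbt : btB [] chosen seen = PySem.Set.add seen (sortf chosen) := rfl
      have hr : (((prodA []).filter (fun t => (chosen ++ t).Nodup)).map
          (fun t => sortf (chosen ++ t))) = [sortf chosen] := by
        simp [prodA, hch]
      rw [hbt, hr]
      refine ⟨PySem.Set.nodup_add seen (sortf chosen) hseen, ?_⟩
      by_cases hm : sortf chosen ∈ seen
      · rw [PySem.Set.add_of_mem hm, List.toFinset_cons, List.toFinset_nil]
        exact (Finset.union_eq_left.mpr (by simp [hm])).symm
      · rw [PySem.Set.add_of_not_mem hm]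
        exact List.toFinset_append
  | cons c rest ih =>
      intro chosen seen hch hseen
      rw [btB_cons]
      -- inner induction over the candidate list c
      suffices h : ∀ (l : List String) (sn : PySem.Set (List String)), List.Nodup sn →
          (l.foldl (fun sn u => if u ∈ chosen then sn else btB rest (chosen ++ [u]) sn) sn).Nodup ∧
          (l.foldl (fun sn u => if u ∈ chosen then sn else btB rest (chosen ++ [u]) sn) sn).toFinset =
            sn.toFinset ∪
              (l.flatMap (fun u =>
                ((prodA rest).filter (fun t => (chosen ++ u :: t).Nodup)).map
                  (fun t => sortf (chosen ++ u :: t)))).toFinset by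
        obtain ⟨h1, h2⟩ := h c seen hseen
        refine ⟨h1, ?_⟩
        rw [h2]
        congr 1
        ext y
        simp only [List.mem_toFinset, List.mem_flatMap, List.mem_map, List.mem_filter,
          prodA, decide_eq_true_eq]
        constructor
        · rintro ⟨u, hu, t, ⟨ht, hnd⟩, rfl⟩
          exact ⟨u :: t, ⟨⟨u, hu, t, ht, rfl⟩, hnd⟩, rfl⟩
        · rintro ⟨s, ⟨⟨u, hu, t, ht, rfl⟩, hnd⟩, rfl⟩
          exact ⟨u, hu, t, ⟨ht, hnd⟩, rfl⟩
      intro l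
      induction l with
      | nil => intro sn hsn; simp [hsn]
      | cons u l ihl =>
          intro sn hsn
          simp only [List.foldl_cons, List.flatMap_cons, List.toFinset_append]
          by_cases hu : u ∈ chosen
          · rw [if_pos hu]
            obtain ⟨h1, h2⟩ := ihl sn hsn
            refine ⟨h1, ?_⟩
            rw [h2]
            have hempty :
                ((prodA rest).filter (fun t => (chosen ++ u :: t).Nodup)).map
                  (fun t => sortf (chosen ++ u :: t)) = [] := by
              rw [List.filter_eq_nil_iff.mpr, List.map_nil]
              intro t _
              simp only [decide_eq_true_eq]
              intro hnd
              rw [List.append_cons] at hnd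
              have h1 : (chosen ++ [u]).Nodup := hnd.of_append_left
              simp [List.nodup_append] at h1
              exact h1.2 u hu rfl
            rw [hempty]
            simp
          · rw [if_neg hu]
            have hch' : (chosen ++ [u]).Nodup := by
              rw [List.nodup_append]
              refine ⟨hch, List.nodup_singleton _, ?_⟩
              intro y hy b hb hyb
              rw [List.mem_singleton.mp hb] at hyb
              exact hu (hyb ▸ hy)
            obtain ⟨g1, g2⟩ := ih (chosen ++ [u]) sn hch' hsn
            simp only [List.append_assoc, List.singleton_append] at g2
            obtain ⟨h1, h2⟩ := ihl _ g1
            refine ⟨h1, ?_⟩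
            rw [h2, g2, Finset.union_assoc]

-- ===== VERDICT (by name: the statement is the Claim_ definition above) =====
theorem solution_spec : Claim_equal_solution := by
  intro user_id banned_id _dom
  unfold Spec_solution solution solution_alt
  simp only [filter_match_eq]
  set cand := banned_id.map (fun b => user_id.filter (fun u => matchesB b u)) with hcand
  obtain ⟨ha1, ha2⟩ := dedupLoopA_spec (prodA cand).reverse [] List.nodup_nil
  obtain ⟨hb1, hb2⟩ := btB_spec cand [] PySem.Set.empty List.nodup_nil List.nodup_nil
  have hA : (dedupLoopA (prodA cand).reverse []).length =
      (((prodA cand).filter (fun a => a.Nodup)).map sortf).toFinset.card := by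
    rw [← List.toFinset_card_of_nodup ha1, ha2]
    simp [List.filter_reverse, List.map_reverse]
  have hB : (btB cand [] PySem.Set.empty).length =
      (((prodA cand).filter (fun a => a.Nodup)).map sortf).toFinset.card := by
    rw [← List.toFinset_card_of_nodup hb1, hb2]
    simp [PySem.Set.empty]
    rfl
  show Int.ofNat (dedupLoopA (prodA cand).reverse []).length =
    PySem.Set.len (btB cand [] PySem.Set.empty)
  rw [show PySem.Set.len (btB cand [] PySem.Set.empty) =
      ((btB cand [] PySem.Set.empty).length : Int) from rfl]
  rw [hA, hB]
  rfl
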